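-- pv_equiv track=rewrite | github.com/Raymondgwangryeol/Raymondgwangryeol | 프로그래머스/2/131127. 할인 행사/할인 행사.py | solution
-- ===== SOURCE A (Python) =====
-- from collections import Counter
--
-- def solution(want, number, discount):
--     want_d={}
--     count = 0
--     for item, num in zip(want, number):
--         want_d[item]=num
--     for i in range(len(discount)-9):
--         check=True
--         discount_d=Counter(discount[i:i+10])
--         for value in want_d:
--             if discount_d.get(value, 0)!=want_d[value]:
--                 check=False
--                 break
--         if check:
--             count+=1
--     return count
-- ===== SOURCE B (Python) =====
-- def solution(want, number, discount):
--     targets = {}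
--     for item, num in zip(want, number):
--         targets[item] = num
--     n = len(discount)
--     if n < 10:
--         return 0
--     cnt = {}
--     for d in discount[:10]:
--         cnt[d] = cnt.get(d, 0) + 1
--     total = len(targets)
--     matched = 0
--     for k in targets:
--         if cnt.get(k, 0) == targets[k]:
--             matched += 1
--     count = 1 if matched == total else 0
--     for i in range(1, n - 9):
--         for x, delta in ((discount[i - 1], -1), (discount[i + 9], 1)):
--             if x in targets:
--                 if cnt.get(x, 0) == targets[x]:
--                     matched -= 1
--                 cnt[x] = cnt.get(x, 0) + delta
--                 if cnt.get(x, 0) == targets[x]: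
--                     matched += 1
--             else:
--                 cnt[x] = cnt.get(x, 0) + delta
--         if matched == total:
--             count += 1
--     return count
-- ===== Notes on version B (the rewrite author's own statement) =====
-- stated objective: faster
-- what changed: A rebuilds a Counter of every 10-element window and rescans the whole wanted dict per window; B keeps one sliding counter updated by the leaving/entering element and an incrementally maintained count of matched wanted items, rechecking only the (at most two) touched keys per slide.
import Mathlib
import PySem

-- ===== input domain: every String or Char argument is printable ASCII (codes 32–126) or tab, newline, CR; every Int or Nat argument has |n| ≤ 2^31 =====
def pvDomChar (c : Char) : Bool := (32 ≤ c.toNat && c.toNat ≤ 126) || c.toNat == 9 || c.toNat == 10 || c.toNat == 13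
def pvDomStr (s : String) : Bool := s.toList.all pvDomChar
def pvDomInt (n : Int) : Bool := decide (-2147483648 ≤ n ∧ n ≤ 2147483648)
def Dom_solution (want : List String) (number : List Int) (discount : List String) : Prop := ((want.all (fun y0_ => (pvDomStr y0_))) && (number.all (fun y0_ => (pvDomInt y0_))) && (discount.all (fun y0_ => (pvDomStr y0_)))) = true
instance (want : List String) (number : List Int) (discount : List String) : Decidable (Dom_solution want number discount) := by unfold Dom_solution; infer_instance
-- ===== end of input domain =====

-- B replaces A's per-window Counter rebuild and full rescan of the wanted dict by a sliding
-- window: one counter updated with the leaving/entering element and an incrementally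
-- maintained 'matched' tally.

-- ===== PORT A =====
-- both Pythons build the want→number dict with the identical zip loop
def buildWantDict (want : List String) (number : List Int) : PySem.Dict String Int :=
  (want.zip number).foldl (fun d p => d.insert p.1 p.2) PySem.Dict.empty

-- A's 'for value in want_d: if …: check=False; break' loop, over the dict's key/value pairs
def solutionCheck (discount_d : PySem.Dict String Int) : List (String × Int) → Bool
  | [] => true
  | p :: rest => if discount_d.getD p.1 0 != p.2 then false else solutionCheck discount_d rest

def solution (want : List String) (number : List Int) (discount : List String) : Int :=
  let want_d := buildWantDict want number
  (PySem.List.pyRange 0 ((discount.length : Int) - 9) 1).foldl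
    (fun count i =>
      let discount_d := PySem.Dict.counter (PySem.List.slice discount (some i) (some (i + 10)))
      if solutionCheck discount_d want_d.items then count + 1 else count) 0

-- ===== PORT B =====
-- one element x enters (delta = 1) or leaves (delta = -1) the window: update cnt and matched
def altAdjust (targets : PySem.Dict String Int) (st : PySem.Dict String Int × Int)
    (x : String) (delta : Int) : PySem.Dict String Int × Int :=
  match targets.get? x with
  | some t =>
    let m1 := if st.1.getD x 0 == t then st.2 - 1 else st.2
    let cnt' := st.1.insert x (st.1.getD x 0 + delta)
    (cnt', if cnt'.getD x 0 == t then m1 + 1 else m1)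
  | none => (st.1.insert x (st.1.getD x 0 + delta), st.2)

-- B's loop body: slide the window to start at i (state = (cnt, matched, count))
def altStep (targets : PySem.Dict String Int) (discount : List String)
    (s : PySem.Dict String Int × Int × Int) (i : Int) : PySem.Dict String Int × Int × Int :=
  let s1 := altAdjust targets (s.1, s.2.1) (PySem.List.pyGetD discount (i - 1) "") (-1)
  let s2 := altAdjust targets s1 (PySem.List.pyGetD discount (i + 9) "") 1
  (s2.1, s2.2, if s2.2 == (targets.size : Int) then s.2.2 + 1 else s.2.2)

def solution_alt (want : List String) (number : List Int) (discount : List String) : Int :=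
  let targets := buildWantDict want number
  let n : Int := discount.length
  if n < 10 then 0
  else
    let cnt0 := (PySem.List.slice discount none (some 10)).foldl
      (fun d x => d.insert x (d.getD x 0 + 1)) PySem.Dict.empty
    let matched0 : Int :=
      targets.items.foldl (fun m p => if cnt0.getD p.1 0 == p.2 then m + 1 else m) 0
    let st := (PySem.List.pyRange 1 (n - 9) 1).foldl (altStep targets discount)
      (cnt0, matched0, if matched0 == (targets.size : Int) then 1 else 0)
    st.2.2

-- ===== PRECONDITION & SPEC =====
def Spec_solution (want : List String) (number : List Int) (discount : List String) (out : Int) : Prop := out = solution_alt want number discount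
instance (want : List String) (number : List Int) (discount : List String) (out : Int) : Decidable (Spec_solution want number discount out) := by unfold Spec_solution; infer_instance

-- ===== CLAIM (what is proved, stated in full; the proofs are below) =====
def Claim_equal_solution : Prop := ∀ (want : List String) (number : List Int) (discount : List String), Dom_solution want number discount → Spec_solution want number discount (solution want number discount)

-- ===== LEMMAS AND PROOFS =====

-- the 10-element window starting at j
def Wnd (discount : List String) (j : ℕ) : List String := (discount.drop j).take 10

-- a window satisfies the wanted quantities
def okW (T : PySem.Dict String Int) (w : List String) : Bool :=
  T.items.all (fun p => ((w.count p.1 : Int) == p.2))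

-- reference: count the good windows among the given start indices
def refFold (T : PySem.Dict String Int) (discount : List String) (js : List ℕ) (c : Int) : Int :=
  js.foldl (fun c j => if okW T (Wnd discount j) then c + 1 else c) c

theorem check_eq_all (dd : PySem.Dict String Int) (l : List (String × Int)) :
    solutionCheck dd l = l.all (fun p => dd.getD p.1 0 == p.2) := by
  induction l with
  | nil => rfl
  | cons p rest ih =>
    simp only [solutionCheck, List.all_cons, bne, ih]
    cases h : dd.getD p.1 0 == p.2 <;> simp

theorem nodup_keys_buildWantDict (want : List String) (number : List Int) :
    (buildWantDict want number).keys.Nodup := by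
  unfold buildWantDict
  exact PySem.Dict.nodup_keys_foldl_insert_key _ Prod.fst _ _ PySem.Dict.nodup_keys_empty

theorem countP_agree (l : List (String × Int)) (f f' : String → Int) (x : String)
    (h : ∀ k, k ≠ x → f' k = f k) (hx : x ∉ l.map Prod.fst) :
    l.countP (fun p => f' p.1 == p.2) = l.countP (fun p => f p.1 == p.2) := by
  apply List.countP_congr
  intro p hp
  have : p.1 ≠ x := fun he => hx (he ▸ List.mem_map_of_mem hp)
  rw [h p.1 this]

theorem countP_upd (l : List (String × Int)) (f f' : String → Int) (x : String) (t : Int)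
    (hagree : ∀ k, k ≠ x → f' k = f k) (hnd : (l.map Prod.fst).Nodup) (hmem : (x, t) ∈ l) :
    (l.countP (fun p => f' p.1 == p.2) : Int)
      = (l.countP (fun p => f p.1 == p.2) : Int)
        - (if f x == t then 1 else 0) + (if f' x == t then 1 else 0) := by
  induction l with
  | nil => simp at hmem
  | cons q rest ih =>
    simp only [List.map_cons, List.nodup_cons] at hnd
    rcases List.mem_cons.mp hmem with hq | hq
    · subst hq
      have hx : x ∉ rest.map Prod.fst := hnd.1
      rw [List.countP_cons, List.countP_cons, countP_agree rest f f' x hagree hx]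
      split_ifs <;> push_cast <;> omega
    · have hne : q.1 ≠ x := by
        intro he
        exact hnd.1 (he ▸ List.mem_map_of_mem hq)
      have := ih hnd.2 hq
      rw [List.countP_cons, List.countP_cons]
      simp only [hagree q.1 hne]
      push_cast at this ⊢
      rw [this]
      split_ifs <;> omega

theorem adjust_spec (T : PySem.Dict String Int) (hnd : T.keys.Nodup)
    (cnt : PySem.Dict String Int) (matched : Int) (x : String) (δ : Int) (f : String → Int)
    (hc : ∀ k, cnt.getD k 0 = f k)
    (hm : matched = (T.items.countP (fun p => f p.1 == p.2) : Int)) :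
    (∀ k, (altAdjust T (cnt, matched) x δ).1.getD k 0 = if k = x then f x + δ else f k) ∧
    (altAdjust T (cnt, matched) x δ).2
      = (T.items.countP (fun p => (if p.1 = x then f x + δ else f p.1) == p.2) : Int) := by
  have hagree : ∀ k, k ≠ x → (if k = x then f x + δ else f k) = f k := by
    intro k hk; simp [hk]
  cases hg : T.get? x with
  | none =>
    have hx : x ∉ T.items.map Prod.fst := by
      have := (PySem.Dict.get?_eq_none_iff_not_mem_keys T x).mp hg
      intro hmem
      exact this (by simpa [PySem.Dict.keys] using hmem)
    constructor
    · intro k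
      simp only [altAdjust, hg, PySem.Dict.getD_insert, hc]
    · simp only [altAdjust, hg]
      rw [hm, countP_agree T.items f _ x hagree hx]
  | some t =>
    have hmem : (x, t) ∈ T.items :=
      (PySem.Dict.get?_eq_some_iff_mem_items T x t hnd).mp hg
    have hndi : (T.items.map Prod.fst).Nodup := by
      simpa [PySem.Dict.keys] using hnd
    constructor
    · intro k
      simp only [altAdjust, hg, PySem.Dict.getD_insert, hc]
    · have hupd := countP_upd T.items f (fun k => if k = x then f x + δ else f k) x t hagree hndi hmem
      beta_reduce at hupd
      simp only [if_pos rfl] at hupd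
      simp only [altAdjust, hg, PySem.Dict.getD_insert_self, hc, hm]
      rw [hupd]
      split_ifs <;> omega

-- sliding the window by one: the counts change by the leaving and the entering element
theorem wnd_shift (discount : List String) (j : ℕ) (h : j + 10 < discount.length) (k : String) :
    ((Wnd discount (j + 1)).count k : Int)
      = (if k = discount.getD j "" then ((Wnd discount j).count k : Int) - 1 else ((Wnd discount j).count k : Int))
        + (if k = discount.getD (j + 10) "" then 1 else 0) := by
  have hj : j < discount.length := by omega
  have h1 : Wnd discount j = discount.getD j "" :: (discount.drop (j+1)).take 9 := by
    unfold Wnd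
    rw [List.getD_eq_getElem _ _ hj, List.drop_eq_getElem_cons hj]
    rfl
  have hlen : 9 < (discount.drop (j+1)).length := by
    rw [List.length_drop]; omega
  have h2 : Wnd discount (j + 1) = (discount.drop (j+1)).take 9 ++ [discount.getD (j+10) ""] := by
    unfold Wnd
    rw [show (10 : ℕ) = 9 + 1 from rfl, List.take_add_one]
    congr 1
    rw [List.getElem?_eq_getElem hlen]
    simp only [List.getElem_drop, Option.toList_some]
    rw [List.getD_eq_getElem _ _ (show j + 10 < discount.length from h)]
  rw [h1, h2]
  simp only [List.count_cons, List.count_append]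
  by_cases e0 : k = discount.getD j "" <;> by_cases e1 : k = discount.getD (j+10) "" <;>
    simp only [e0, e1, beq_iff_eq, beq_self_eq_true, if_true, if_false] <;>
    simp_all [eq_comm] <;> push_cast <;> omega

-- matched == total is exactly the all-quantities-match test
theorem matched_total (T : PySem.Dict String Int) (w : List String) :
    (((T.items.countP (fun p => ((w.count p.1 : Int) == p.2)) : Int)) == (T.size : Int))
      = okW T w := by
  unfold okW
  rw [show ((T.size : Int)) = ((T.items.length : Int)) from rfl]
  cases hb : (T.items.all fun p => ((w.count p.1 : Int) == p.2)) with
  | false =>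
    rw [beq_eq_false_iff_ne]
    intro hEq
    have h2 : T.items.countP (fun p => ((w.count p.1 : Int) == p.2)) = T.items.length := by
      exact_mod_cast hEq
    rw [List.countP_eq_length] at h2
    simp only [List.all_eq_false] at hb
    obtain ⟨p, hp, hnp⟩ := hb
    exact hnp (h2 p hp)
  | true =>
    rw [List.all_eq_true] at hb
    rw [List.countP_eq_length.mpr hb]
    simp

-- one slide of B's loop, from window j to window j+1
theorem B_step (T : PySem.Dict String Int) (hnd : T.keys.Nodup) (discount : List String)
    (j : ℕ) (hj10 : j + 10 < discount.length)
    (cnt : PySem.Dict String Int) (matched count : Int)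
    (hc : ∀ k, cnt.getD k 0 = ((Wnd discount j).count k : Int))
    (hm : matched = (T.items.countP (fun p => (((Wnd discount j).count p.1 : Int)) == p.2) : Int)) :
    (∀ k, (altStep T discount (cnt, matched, count) ((j : Int) + 1)).1.getD k 0
        = ((Wnd discount (j+1)).count k : Int)) ∧
    (altStep T discount (cnt, matched, count) ((j : Int) + 1)).2.1
        = (T.items.countP (fun p => (((Wnd discount (j+1)).count p.1 : Int)) == p.2) : Int) ∧
    (altStep T discount (cnt, matched, count) ((j : Int) + 1)).2.2
        = (if okW T (Wnd discount (j+1)) then count + 1 else count) := by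
  have e0 : PySem.List.pyGetD discount (((j : Int) + 1) - 1) "" = discount.getD j "" := by
    have : ((j : Int) + 1) - 1 = ((j : ℕ) : Int) := by push_cast; ring
    rw [this, PySem.List.pyGetD_natCast]
  have e1 : PySem.List.pyGetD discount (((j : Int) + 1) + 9) "" = discount.getD (j + 10) "" := by
    have : ((j : Int) + 1) + 9 = ((j + 10 : ℕ) : Int) := by push_cast; ring
    rw [this, PySem.List.pyGetD_natCast]
  obtain ⟨hc1, hm1⟩ := adjust_spec T hnd cnt matched (discount.getD j "") (-1)
    (fun k => ((Wnd discount j).count k : Int)) hc hm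
  obtain ⟨hc2, hm2⟩ := adjust_spec T hnd _ _ (discount.getD (j + 10) "") 1 _ hc1 hm1
  have hf2w : ∀ k,
      (if k = discount.getD (j + 10) ""
        then (if discount.getD (j + 10) "" = discount.getD j ""
                then ((Wnd discount j).count (discount.getD j "") : Int) + (-1)
                else ((Wnd discount j).count (discount.getD (j + 10) "") : Int)) + 1
        else (if k = discount.getD j ""
                then ((Wnd discount j).count (discount.getD j "") : Int) + (-1)
                else ((Wnd discount j).count k : Int)))
      = ((Wnd discount (j+1)).count k : Int) := by
    intro k
    rw [wnd_shift discount j hj10 k]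
    split_ifs <;> simp_all <;> omega
  have hcnt' : ∀ k, (altAdjust T (altAdjust T (cnt, matched) (discount.getD j "") (-1))
      (discount.getD (j + 10) "") 1).1.getD k 0 = ((Wnd discount (j+1)).count k : Int) := by
    intro k
    rw [hc2 k, ← hf2w k]
  have hm' : (altAdjust T (altAdjust T (cnt, matched) (discount.getD j "") (-1))
      (discount.getD (j + 10) "") 1).2
      = (T.items.countP (fun p => (((Wnd discount (j+1)).count p.1 : Int)) == p.2) : Int) := by
    rw [hm2]
    congr 1
    exact List.countP_congr (fun p _ => by rw [← hf2w p.1])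
  simp only [altStep, e0, e1]
  refine ⟨fun k => by simpa using hcnt' k, by simpa using hm', ?_⟩
  simp only [hm']
  rw [matched_total]

-- the main sliding-window invariant
theorem B_loop (T : PySem.Dict String Int) (hnd : T.keys.Nodup) (discount : List String) :
    ∀ (K j : ℕ), j + K + 10 ≤ discount.length →
    ∀ (cnt : PySem.Dict String Int) (matched count : Int),
    (∀ k, cnt.getD k 0 = ((Wnd discount j).count k : Int)) →
    matched = (T.items.countP (fun p => (((Wnd discount j).count p.1 : Int)) == p.2) : Int) →
    (((List.range K).map (fun t : ℕ => ((j : Int) + 1 + t))).foldl (altStep T discount)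
      (cnt, matched, count)).2.2
      = refFold T discount ((List.range K).map (fun t => j + 1 + t)) count := by
  intro K
  induction K with
  | zero => intro j _ cnt matched count _ _; simp [refFold]
  | succ K ih =>
    intro j hK cnt matched count hc hm
    have hj10 : j + 10 < discount.length := by omega
    obtain ⟨hc', hm', hcount'⟩ := B_step T hnd discount j hj10 cnt matched count hc hm
    rw [List.range_succ_eq_map]
    simp only [List.map_cons, List.foldl_cons, List.map_map, Nat.cast_zero, add_zero]
    have hstate : altStep T discount (cnt, matched, count) ((j : Int) + 1)
        = ((altStep T discount (cnt, matched, count) ((j : Int) + 1)).1,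
           (altStep T discount (cnt, matched, count) ((j : Int) + 1)).2.1,
           (altStep T discount (cnt, matched, count) ((j : Int) + 1)).2.2) := rfl
    rw [hstate, hcount']
    have hrec := ih (j + 1) (by omega)
      (altStep T discount (cnt, matched, count) ((j : Int) + 1)).1
      (altStep T discount (cnt, matched, count) ((j : Int) + 1)).2.1
      (if okW T (Wnd discount (j + 1)) then count + 1 else count) hc' hm'
    have hlist1 : ((List.range K).map (fun t : ℕ => (((j + 1 : ℕ) : Int) + 1 + t)))
        = (List.range K).map ((fun t : ℕ => ((j : Int) + 1 + t)) ∘ Nat.succ) := by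
      apply List.map_congr_left; intro t _
      simp [Function.comp]; push_cast; ring
    have hlist2 : ((List.range K).map (fun t : ℕ => (j + 1) + 1 + t))
        = (List.range K).map ((fun t : ℕ => j + 1 + t) ∘ Nat.succ) := by
      apply List.map_congr_left; intro t _
      simp [Function.comp]; omega
    rw [hlist1, hlist2] at hrec
    rw [refFold, List.foldl_cons, ← refFold]
    exact hrec

-- A computes the reference fold over all window start indices
theorem A_eq_ref (want : List String) (number : List Int) (discount : List String) :
    solution want number discount
      = refFold (buildWantDict want number) discount
          (List.range (((discount.length : Int) - 9).toNat)) 0 := by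
  simp only [solution]
  rw [PySem.List.pyRange_of_pos 0 ((discount.length : Int) - 9) (by norm_num)]
  have hN : (if (0:Int) < (discount.length : Int) - 9
      then (((discount.length : Int) - 9 - 0 + 1 - 1) / 1).toNat else 0)
      = ((discount.length : Int) - 9).toNat := by
    simp only [Int.ediv_one]
    split_ifs with h
    · congr 1; omega
    · omega
  rw [hN, List.foldl_map]
  unfold refFold
  congr 1
  funext c j
  have hsl : PySem.List.slice discount (some (0 + 1 * (j : Int))) (some (0 + 1 * (j : Int) + 10))
      = Wnd discount j := by
    have h10 : (0 : Int) + 1 * (j : Int) + 10 = ((j : ℕ) : Int) + ((10 : ℕ) : Int) := by push_cast; ring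
    have hj : (0 : Int) + 1 * (j : Int) = ((j : ℕ) : Int) := by push_cast; ring
    rw [h10, hj, PySem.List.slice_natCast_add]
    rfl
  rw [hsl, check_eq_all]
  simp only [okW, PySem.Dict.getD_counter]
  rfl

theorem solution_spec : Claim_equal_solution := by
  intro want number discount _
  unfold Spec_solution
  have hnd := nodup_keys_buildWantDict want number
  by_cases hlen : discount.length < 10
  · have hA : solution want number discount = 0 := by
      rw [A_eq_ref]
      rw [show ((discount.length : Int) - 9).toNat = 0 by omega]
      simp [refFold]
    rw [hA]
    simp only [solution_alt]
    rw [if_pos (by exact_mod_cast hlen)]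
  · push_neg at hlen
    -- A side
    have hA : solution want number discount
        = refFold (buildWantDict want number) discount
            ((List.range (discount.length - 10)).map (fun t => 0 + 1 + t))
            (if okW (buildWantDict want number) (Wnd discount 0) then 1 else 0) := by
      rw [A_eq_ref]
      rw [show ((discount.length : Int) - 9).toNat = (discount.length - 10) + 1 by omega]
      rw [List.range_succ_eq_map]
      simp only [refFold, List.foldl_cons, List.foldl_map, zero_add]
      congr 1
      funext c t
      simp only [Nat.succ_eq_add_one, show (0:ℕ) + 1 + t = t + 1 from by omega]
    rw [hA]
    -- B side
    simp only [solution_alt]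
    have hge : ¬ ((discount.length : Int) < 10) := by omega
    rw [if_neg hge]
    set C : PySem.Dict String Int := (PySem.List.slice discount none (some 10)).foldl
      (fun d x => d.insert x (d.getD x 0 + 1)) PySem.Dict.empty with hC
    have hc0 : ∀ k, C.getD k 0 = ((Wnd discount 0).count k : Int) := by
      intro k
      rw [hC, PySem.Dict.getD_foldl_insert_add_one, PySem.Dict.getD_empty]
      rw [PySem.List.slice_to discount (by norm_num : (0:Int) ≤ (10:Int))]
      simp [Wnd]
    have hm0 : ((buildWantDict want number).items.foldl
        (fun m p => if C.getD p.1 0 == p.2 then m + 1 else m) 0 : Int)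
        = ((buildWantDict want number).items.countP
            (fun p => (((Wnd discount 0).count p.1 : Int)) == p.2) : Int) := by
      rw [PySem.List.foldl_if_add_one (fun p : String × Int => C.getD p.1 0 == p.2)]
      rw [zero_add]
      congr 1
      apply List.countP_congr
      intro p _
      rw [hc0 p.1]
    have hrange : PySem.List.pyRange 1 ((discount.length : Int) - 9) 1
        = (List.range (discount.length - 10)).map (fun t : ℕ => (((0:ℕ) : Int)) + 1 + t) := by
      rw [PySem.List.pyRange_of_pos 1 ((discount.length : Int) - 9) (by norm_num)]
      have : (if (1:Int) < (discount.length : Int) - 9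
          then (((discount.length : Int) - 9 - 1 + 1 - 1) / 1).toNat else 0)
          = discount.length - 10 := by
        simp only [Int.ediv_one]
        split_ifs with h <;> omega
      rw [this]
      apply List.map_congr_left
      intro t _
      push_cast
      ring
    rw [hrange, hm0, matched_total]
    exact (B_loop (buildWantDict want number) hnd discount (discount.length - 10) 0
      (by omega) _ _ _ hc0 rfl).symm
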